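-- pv_equiv track=rewrite | github.com/cycleuser/leetcode | solutions/python3/656.py | cheapestJump
-- ===== SOURCE A (Python) =====
-- from typing import List
--
-- def cheapestJump(A: List[int], B: int) -> List[int]:
--     """
--     定义一个类Solution，并在其中定义cheapestJump方法。
--     该方法接收两个参数：A为一维数组，B为正整数。
--     返回值是一个包含跳转路径的列表或空列表。
--
--     英文注释：
--     Define a class Solution and in it define the cheapestJump method.
--     This method takes two parameters: A as a list of integers, B as a positive integer.
--     It returns a list containing the path of jumps or an empty list.
--     """
--
--     n = len(A)
--     # 初始化preMin字典，记录每个位置跳转的最小花费及其前一个位置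
--     preMin = {n - 1: [n]}
--
--     for i in range(n - 2, -1, -1):
--         if A[i] == -1:
--             continue
--
--         mn, preIndex = float("inf"), None
--         # 遍历从当前位置到B步范围内，寻找最小花费及其前一个位置
--         for ind in range(i + 1, min(i + B + 1, n)):
--             if -1 < A[ind] < mn:
--                 mn, preIndex = A[ind], ind
--
--         # 如果找到了合适的前一个位置，则更新当前位置的花费和preMin字典
--         if preIndex is not None:
--             A[i] += A[preIndex]
--             preMin[i] = preMin[preIndex] + [i + 1]
--         else:
--             # 如果没有找到合适的位置，说明无法从当前位置跳跃到目标位置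
--             A[i] = -1
--
--     # 返回路径列表或空列表
--     return (0 in preMin and preMin[0][::-1]) or []
-- ===== SOURCE B (Python) =====
-- from typing import List
-- from collections import deque
--
-- def cheapestJump(A: List[int], B: int) -> List[int]:
--     # Sliding-window minimum via a monotonic deque + parent pointers; path
--     # rebuilt once at the end.  Does NOT mutate A (the original does).
--     n = len(A)
--     if n == 0:
--         return []
--     cost = A[:]
--     parent = {}
--     dq = deque()  # indices ascending, costs strictly decreasing; minimum at the right
--     for i in range(n - 2, -1, -1):
--         j = i + 1
--         if cost[j] > -1:
--             while dq and cost[dq[0]] >= cost[j]: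
--                 dq.popleft()
--             dq.appendleft(j)
--         while dq and dq[-1] > i + B:
--             dq.pop()
--         if cost[i] == -1:
--             continue
--         if dq:
--             m = dq[-1]
--             parent[i] = m
--             cost[i] += cost[m]
--         else:
--             cost[i] = -1
--     if n == 1 or 0 in parent:
--         path, i = [], 0
--         while True:
--             path.append(i + 1)
--             if i in parent:
--                 i = parent[i]
--             else:
--                 break
--         return path
--     return []
-- ===== Notes on version B (the rewrite author's own statement) =====
-- stated objective: faster
-- what changed: Replaces A's per-position rescan of the next B cells and per-position path-list copying (plus a dict of full paths) by a monotonic-deque sliding-window minimum with parent pointers, rebuilding the path once at the end; B does not mutate its argument (A does).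
import Mathlib
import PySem

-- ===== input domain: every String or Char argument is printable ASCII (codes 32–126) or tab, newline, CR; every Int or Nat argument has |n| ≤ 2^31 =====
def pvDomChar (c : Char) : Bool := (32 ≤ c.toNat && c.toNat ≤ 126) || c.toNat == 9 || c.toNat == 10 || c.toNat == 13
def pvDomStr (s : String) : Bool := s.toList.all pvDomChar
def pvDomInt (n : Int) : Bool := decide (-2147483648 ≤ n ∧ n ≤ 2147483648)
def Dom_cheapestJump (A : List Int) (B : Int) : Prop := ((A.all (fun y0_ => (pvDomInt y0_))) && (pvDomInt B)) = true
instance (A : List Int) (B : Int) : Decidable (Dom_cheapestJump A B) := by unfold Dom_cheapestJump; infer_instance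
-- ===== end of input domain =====

-- B replaces A's per-position O(B) rescan and per-position path-list copying by a
-- monotonic-deque sliding-window minimum with parent pointers (path rebuilt once);
-- equivalence is about the RETURN value only: A mutates its list argument, B does not.

-- ===== PORT A =====
-- inner loop 'for ind in range(i+1, min(i+B+1, n)): if -1 < A[ind] < mn: mn, preIndex = A[ind], ind'
-- (mn = none plays float('inf'), preIndex = none plays None)
def pvInnerA (a : List Int) (mp : Option Int × Option Int) (ind : Int) : Option Int × Option Int :=
  let x := PySem.List.pyGetD a ind 0
  if (decide (-1 < x) && (match mp.1 with | none => true | some m => decide (x < m))) then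
    (some x, some ind)
  else mp

-- one iteration of A's main loop body (indices i are always in range, so pyGetD/pySetD
-- defaults are never taken; preMin[preIndex] is always present, so getD's default is never taken)
def pvStepA (B n : Int) (s : List Int × PySem.Dict Int (List Int)) (i : Int) :
    List Int × PySem.Dict Int (List Int) :=
  let a := s.1
  let pm := s.2
  if PySem.List.pyGetD a i 0 == -1 then s
  else
    let r := (PySem.List.pyRange (i + 1) (min (i + B + 1) n) 1).foldl (pvInnerA a) (none, none)
    match r.2 with
    | some pre =>
        (PySem.List.pySetD a i (PySem.List.pyGetD a i 0 + PySem.List.pyGetD a pre 0),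
         pm.insert i (pm.getD pre [] ++ [i + 1]))
    | none => (PySem.List.pySetD a i (-1), pm)

def cheapestJump (A : List Int) (B : Int) : List Int :=
  let n : Int := PySem.List.len A
  let st := (PySem.List.pyRange (n - 2) (-1) (-1)).foldl (pvStepA B n)
    (A, PySem.Dict.empty.insert (n - 1) [n])
  match st.2.get? 0 with
  | some l => if l.reverse.isEmpty then [] else l.reverse
  | none => []

-- ===== PORT B =====
-- 'while dq and cost[dq[0]] >= v: dq.popleft()'
def pvPopLeft (c : List Int) (v : Int) : List Int → List Int
  | [] => []
  | x :: rest =>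
      if decide (v ≤ PySem.List.pyGetD c x 0) then pvPopLeft c v rest else x :: rest

-- 'while dq and dq[-1] > t: dq.pop()'
def pvPopRight (t : Int) (dq : List Int) : List Int :=
  match _h : dq.getLast? with
  | some x => if decide (t < x) then pvPopRight t dq.dropLast else dq
  | none => dq
termination_by dq.length
decreasing_by
  have hne : dq ≠ [] := by intro hnil; rw [hnil] at _h; simp at _h
  have : 0 < dq.length := List.length_pos_iff.mpr hne
  simp [List.length_dropLast]; omega

-- one iteration of B's main loop body
def pvStepB (B : Int) (s : List Int × PySem.Dict Int Int × List Int) (i : Int) :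
    List Int × PySem.Dict Int Int × List Int :=
  let c := s.1
  let par := s.2.1
  let dq := s.2.2
  let j := i + 1
  let cj := PySem.List.pyGetD c j 0
  let dq1 := if decide (-1 < cj) then j :: pvPopLeft c cj dq else dq
  let dq2 := pvPopRight (i + B) dq1
  if PySem.List.pyGetD c i 0 == -1 then (c, par, dq2)
  else
    match dq2.getLast? with
    | some m =>
        (PySem.List.pySetD c i (PySem.List.pyGetD c i 0 + PySem.List.pyGetD c m 0),
         par.insert i m, dq2)
    | none => (PySem.List.pySetD c i (-1), par, dq2)

-- 'while True: path.append(i+1); if i in parent: i = parent[i] else: break'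
-- fuel = len(A) is a totality guard only: parent chains are strictly increasing and
-- bounded by n-1, so the fuel is never exhausted on states the program builds.
def pvRebuild (par : PySem.Dict Int Int) : Nat → Int → List Int
  | 0, i => [i + 1]
  | fuel + 1, i =>
      match par.get? i with
      | some p => (i + 1) :: pvRebuild par fuel p
      | none => [i + 1]

def cheapestJump_alt (A : List Int) (B : Int) : List Int :=
  let n : Int := PySem.List.len A
  if n == 0 then []
  else
    let st := (PySem.List.pyRange (n - 2) (-1) (-1)).foldl (pvStepB B)
      (A, PySem.Dict.empty, [])
    if n == 1 || (st.2.1.get? 0).isSome then pvRebuild st.2.1 A.length 0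
    else []

-- ===== PRECONDITION & SPEC =====
def Spec_cheapestJump (A : List Int) (B : Int) (out : List Int) : Prop := out = cheapestJump_alt A B
instance (A : List Int) (B : Int) (out : List Int) : Decidable (Spec_cheapestJump A B out) := by unfold Spec_cheapestJump; infer_instance

-- ===== CLAIM (what is proved, stated in full; the proofs are below) =====
def Claim_equal_cheapestJump : Prop := ∀ (A : List Int) (B : Int), Dom_cheapestJump A B → Spec_cheapestJump A B (cheapestJump A B)

-- ===== LEMMAS AND PROOFS =====

-- Abbreviation used throughout the proofs: the cost read at an index.
def pvG (c : List Int) (y : Int) : Int := PySem.List.pyGetD c y 0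

-- 'A[y] > -1': y is a usable (reachable) jump target.
def pvElig (c : List Int) (y : Int) : Bool := decide (-1 < pvG c y)

-- y is in the deque skyline relative to window start lo: usable, and no usable
-- k ∈ [lo, y) has cost ≤ cost y.
def pvPb (c : List Int) (lo y : Int) : Bool :=
  pvElig c y &&
    (PySem.List.pyRange lo y 1).all (fun k => !pvElig c k || decide (pvG c y < pvG c k))

-- partial runs of the two main loops: state before processing index i
def pvRunA (A0 : List Int) (Bj i : Int) : List Int × PySem.Dict Int (List Int) :=
  (PySem.List.pyRange ((A0.length : Int) - 2) i (-1)).foldl (pvStepA Bj A0.length)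
    (A0, PySem.Dict.empty.insert ((A0.length : Int) - 1) [(A0.length : Int)])

def pvRunB (A0 : List Int) (Bj i : Int) : List Int × PySem.Dict Int Int × List Int :=
  (PySem.List.pyRange ((A0.length : Int) - 2) i (-1)).foldl (pvStepB Bj)
    (A0, PySem.Dict.empty, [])

-- the joint loop invariant (state before processing index i)
def pvInv (A0 : List Int) (Bj i : Int) (sA : List Int × PySem.Dict Int (List Int))
    (sB : List Int × PySem.Dict Int Int × List Int) : Prop :=
  sA.1 = sB.1 ∧
  sB.1.length = A0.length ∧
  (∀ j : Int, 0 ≤ j → (j ≤ i ∨ (A0.length : Int) - 1 ≤ j) → pvG sB.1 j = pvG A0 j) ∧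
  (∀ j p : Int, sB.2.1.get? j = some p →
    i < j ∧ j < p ∧ p ≤ (A0.length : Int) - 1 ∧
      (p = (A0.length : Int) - 1 ∨ (sB.2.1.get? p).isSome)) ∧
  (∀ j : Int, i < j → j < (A0.length : Int) - 1 → -1 < pvG sB.1 j → (sB.2.1.get? j).isSome) ∧
  (∀ j : Int, (sA.2.get? j).isSome ↔
    (i < j ∧ j ≤ (A0.length : Int) - 1 ∧
      (j = (A0.length : Int) - 1 ∨ (sB.2.1.get? j).isSome))) ∧
  (∀ j l, sA.2.get? j = some l → l = (pvRebuild sB.2.1 A0.length j).reverse) ∧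
  sB.2.2 = (PySem.List.pyRange (i + 2) (min (i + Bj + 2) (A0.length : Int)) 1).filter
    (pvPb sB.1 (i + 2))

-- ----- small indexing lemmas -----
lemma pvG_set_ne (c : List Int) (i j w : Int) (h0 : 0 ≤ i) (h0j : 0 ≤ j) (hne : j ≠ i) :
    pvG (PySem.List.pySetD c i w) j = pvG c j := by
  have hij : i.toNat ≠ j.toNat := by omega
  simp only [pvG, PySem.List.pySetD_of_nonneg _ _ h0, PySem.List.pyGetD_of_nonneg _ _ h0j,
    List.getD_eq_getElem?_getD, List.getElem?_set_ne hij]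

lemma pvG_set_self (c : List Int) (i w : Int) (h0 : 0 ≤ i) (hlt : i < (c.length : Int)) :
    pvG (PySem.List.pySetD c i w) i = w := by
  have hl : i.toNat < c.length := by omega
  simp [pvG, PySem.List.pySetD_of_nonneg _ _ h0, PySem.List.pyGetD_of_nonneg _ _ h0,
    List.getD_eq_getElem?_getD, hl]

-- ----- pvRebuild lemmas -----
lemma pvRebuild_ne_nil (par : PySem.Dict Int Int) (f : Nat) (i : Int) :
    pvRebuild par f i ≠ [] := by
  cases f with
  | zero => simp [pvRebuild]
  | succ f => cases h : par.get? i <;> simp [pvRebuild, h]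

lemma pvRebuild_insert (par : PySem.Dict Int Int) (i m : Int)
    (hmono : ∀ k p, par.get? k = some p → k < p) :
    ∀ (f : Nat) (j : Int), i < j → pvRebuild (par.insert i m) f j = pvRebuild par f j := by
  intro f
  induction f with
  | zero => intro j hj; rfl
  | succ f ih =>
    intro j hj
    have hne : j ≠ i := by omega
    simp only [pvRebuild, PySem.Dict.get?_insert_of_ne _ _ hne]
    cases h : par.get? j with
    | none => rfl
    | some p =>
      have hp := hmono j p h
      show (j + 1) :: pvRebuild (par.insert i m) f p = (j + 1) :: pvRebuild par f p
      rw [ih p (by omega)]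

lemma pvRebuild_fuel (par : PySem.Dict Int Int) (n : Int)
    (hbnd : ∀ k p, par.get? k = some p → k < p ∧ p ≤ n - 1) :
    ∀ (f g : Nat) (j : Int), (n - 1 - j).toNat ≤ f → (n - 1 - j).toNat ≤ g →
      pvRebuild par f j = pvRebuild par g j := by
  intro f
  induction f with
  | zero =>
    intro g j hf hg
    cases h : par.get? j with
    | none =>
      cases g with
      | zero => rfl
      | succ g => simp [pvRebuild, h]
    | some p => exfalso; have := hbnd j p h; omega
  | succ f ih =>
    intro g j hf hg
    cases g with
    | zero =>
      cases h : par.get? j with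
      | none => simp [pvRebuild, h]
      | some p => exfalso; have := hbnd j p h; omega
    | succ g =>
      cases h : par.get? j with
      | none => simp [pvRebuild, h]
      | some p =>
        have hp := hbnd j p h
        simp only [pvRebuild, h]
        show (j + 1) :: pvRebuild par f p = (j + 1) :: pvRebuild par g p
        rw [ih g p (by omega) (by omega)]

-- ----- range / deque-shape lemmas -----
lemma pvRange_filter_le (lo u t : Int) :
    (PySem.List.pyRange lo u 1).filter (fun y => decide (y ≤ t)) =
      PySem.List.pyRange lo (min (t + 1) u) 1 := by
  have main : ∀ (k : Nat) (lo : Int), (u - lo).toNat ≤ k →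
      (PySem.List.pyRange lo u 1).filter (fun y => decide (y ≤ t)) =
        PySem.List.pyRange lo (min (t + 1) u) 1 := by
    intro k
    induction k with
    | zero =>
      intro lo h
      rw [PySem.List.pyRange_one_eq_nil (by omega), PySem.List.pyRange_one_eq_nil (by omega)]
      rfl
    | succ k ih =>
      intro lo h
      by_cases hlt : lo < u
      · rw [PySem.List.pyRange_one_cons hlt]
        by_cases hle : lo ≤ t
        · rw [PySem.List.pyRange_one_cons (show lo < min (t + 1) u by omega)]
          simp only [List.filter_cons, decide_eq_true hle, if_pos]
          rw [ih (lo + 1) (by omega)]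
        · simp only [List.filter_cons, decide_eq_false hle]
          rw [ih (lo + 1) (by omega)]
          rw [PySem.List.pyRange_one_eq_nil (by omega), PySem.List.pyRange_one_eq_nil (by omega)]
          simp
      · rw [PySem.List.pyRange_one_eq_nil (by omega), PySem.List.pyRange_one_eq_nil (by omega)]
        rfl
  exact main (u - lo).toNat lo le_rfl

lemma pvPopLeft_eq_dropWhile (c : List Int) (v : Int) (l : List Int) :
    pvPopLeft c v l = l.dropWhile (fun x => decide (v ≤ pvG c x)) := by
  induction l with
  | nil => rfl
  | cons x rest ih =>
    simp only [pvPopLeft, List.dropWhile_cons]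
    show (if decide (v ≤ pvG c x) then _ else _) = _
    split <;> simp_all

lemma pvDropWhile_eq_filter (c : List Int) (v : Int) (l : List Int)
    (h : l.Pairwise (fun y z => pvG c z < pvG c y)) :
    l.dropWhile (fun x => decide (v ≤ pvG c x)) = l.filter (fun x => decide (pvG c x < v)) := by
  induction l with
  | nil => rfl
  | cons x rest ih =>
    obtain ⟨hx, hrest⟩ := List.pairwise_cons.mp h
    simp only [List.dropWhile_cons, List.filter_cons]
    by_cases hc : v ≤ pvG c x
    · simp only [decide_eq_true hc, if_pos, decide_eq_false (not_lt.mpr hc)]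
      rw [ih hrest]
      simp
    · have hxv : pvG c x < v := not_le.mp hc
      have hall : ∀ z ∈ rest, decide (pvG c z < v) = true :=
        fun z hz => decide_eq_true (lt_trans (hx z hz) hxv)
      simp [decide_eq_false hc, decide_eq_true hxv, List.filter_eq_self.mpr hall]

lemma pvPopRight_eq_filter (t : Int) (l : List Int) (h : l.Pairwise (· < ·)) :
    pvPopRight t l = l.filter (fun y => decide (y ≤ t)) := by
  induction l using List.reverseRecOn with
  | nil => rw [pvPopRight]; rfl
  | append_singleton xs x ih =>
    have hP : xs.Pairwise (· < ·) := (List.pairwise_append.mp h).1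
    have hlt : ∀ a ∈ xs, a < x :=
      fun a ha => (List.pairwise_append.mp h).2.2 a ha x (List.mem_singleton_self x)
    rw [pvPopRight]
    split
    next y hy =>
      rw [List.getLast?_concat] at hy
      injection hy with h'
      subst h'
      rw [List.dropLast_concat]
      by_cases hc : t < x
      · rw [if_pos (by simp [hc])]
        rw [ih hP, List.filter_append]
        simp [decide_eq_false (not_le.mpr hc)]
      · rw [if_neg (by simp [hc])]
        have hall : ∀ a ∈ xs ++ [x], decide (a ≤ t) = true := by
          intro a ha
          rcases List.mem_append.mp ha with h1 | h1
          · exact decide_eq_true (le_of_lt (lt_of_lt_of_le (hlt a h1) (not_lt.mp hc)))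
          · simp at h1; subst h1; exact decide_eq_true (not_lt.mp hc)
        exact (List.filter_eq_self.mpr hall).symm
    next hy =>
      rw [List.getLast?_concat] at hy
      exact absurd hy (by simp)

-- ----- pvPb lemmas -----
lemma pvPb_self (c : List Int) (lo : Int) : pvPb c lo lo = pvElig c lo := by
  simp [pvPb, PySem.List.pyRange_one_eq_nil (le_refl lo)]

lemma pvPb_cons (c : List Int) (lo y : Int) (h : lo < y) :
    pvPb c lo y = ((!pvElig c lo || decide (pvG c y < pvG c lo)) && pvPb c (lo + 1) y) := by
  simp only [pvPb, PySem.List.pyRange_one_cons h, List.all_cons]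
  rw [Bool.and_left_comm]

lemma pvPb_filter_pairwise (c : List Int) (lo u : Int) :
    ((PySem.List.pyRange lo u 1).filter (pvPb c lo)).Pairwise
      (fun y z => pvG c z < pvG c y) := by
  have h1 : ((PySem.List.pyRange lo u 1).filter (pvPb c lo)).Pairwise (· < ·) :=
    List.Pairwise.sublist List.filter_sublist (PySem.List.pairwise_lt_pyRange_one lo u)
  refine List.Pairwise.imp_of_mem ?_ h1
  intro a b ha hb hab
  obtain ⟨haR, haP⟩ := List.mem_filter.mp ha
  obtain ⟨hbR, hbP⟩ := List.mem_filter.mp hb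
  simp only [pvPb, Bool.and_eq_true, List.all_eq_true] at haP hbP
  have haM : a ∈ PySem.List.pyRange lo b 1 :=
    PySem.List.mem_pyRange_one.mpr ⟨(PySem.List.mem_pyRange_one.mp haR).1, hab⟩
  have := hbP.2 a haM
  simp only [Bool.or_eq_true, Bool.not_eq_eq_eq_not, Bool.not_true, decide_eq_true_eq] at this
  rcases this with h2 | h2
  · rw [haP.1] at h2; exact absurd h2 (by simp)
  · exact h2

lemma pvPb_set (c : List Int) (i w lo y : Int) (h0 : 0 ≤ i) (hi : i < lo) (hy : lo ≤ y) :
    pvPb (PySem.List.pySetD c i w) lo y = pvPb c lo y := by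
  have hyne := pvG_set_ne c i y w h0 (by omega) (by omega)
  rw [Bool.eq_iff_iff]
  simp only [pvPb, pvElig, Bool.and_eq_true, List.all_eq_true, hyne]
  constructor <;>
  · rintro ⟨h1, h2⟩
    refine ⟨h1, fun k hk => ?_⟩
    have hkR := PySem.List.mem_pyRange_one.mp hk
    have hkne := pvG_set_ne c i k w h0 (by omega) (by omega)
    have := h2 k hk
    simpa [hkne] using this

lemma pvInnerA_none (a : List Int) (ind : Int) :
    pvInnerA a (none, none) ind =
      if pvElig a ind then (some (pvG a ind), some ind) else (none, none) := by
  simp [pvInnerA, pvElig, pvG]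

lemma pvInnerA_some (a : List Int) (w m ind : Int) :
    pvInnerA a (some w, some m) ind =
      if pvElig a ind && decide (pvG a ind < w) then (some (pvG a ind), some ind)
      else (some w, some m) := by
  simp [pvInnerA, pvElig, pvG]

-- ----- the inner scan computes the last element of the skyline -----
lemma pvScan (c : List Int) (lo : Int) : ∀ (k : Nat) (u : Int), (u - lo).toNat = k →
    ((PySem.List.pyRange lo u 1).foldl (pvInnerA c) (none, none) =
        (((PySem.List.pyRange lo u 1).filter (pvPb c lo)).getLast?.map (fun m => pvG c m),
         ((PySem.List.pyRange lo u 1).filter (pvPb c lo)).getLast?)) ∧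
      (∀ m, ((PySem.List.pyRange lo u 1).filter (pvPb c lo)).getLast? = some m →
        ∀ y, lo ≤ y → y < u → pvElig c y = true → pvG c m ≤ pvG c y) ∧
      (((PySem.List.pyRange lo u 1).filter (pvPb c lo)).getLast? = none →
        ∀ y, lo ≤ y → y < u → pvElig c y = false) := by
  intro k
  induction k with
  | zero =>
    intro u hu
    rw [PySem.List.pyRange_one_eq_nil (by omega)]
    refine ⟨rfl, ?_, ?_⟩
    · intro m hm; simp at hm
    · intro _ y hy1 hy2; exfalso; omega
  | succ k ih =>
    intro u hu
    have hlt : lo < u := by omega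
    have hsplit := PySem.List.pyRange_one_succ_right (a := lo) (b := u - 1) (by omega : lo ≤ u - 1)
    rw [show u - 1 + 1 = u from by ring] at hsplit
    obtain ⟨ihEq, ihMin, ihNone⟩ := ih (u - 1) (by omega)
    rw [hsplit, List.foldl_append, List.filter_append, ihEq]
    cases hL : ((PySem.List.pyRange lo (u - 1) 1).filter (pvPb c lo)).getLast? with
    | none =>
      have hMnil : (PySem.List.pyRange lo (u - 1) 1).filter (pvPb c lo) = [] :=
        List.getLast?_eq_none_iff.mp hL
      have hnone := ihNone hL
      have hPb : pvPb c lo (u - 1) = pvElig c (u - 1) := by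
        have hall : (PySem.List.pyRange lo (u - 1) 1).all
            (fun k => !pvElig c k || decide (pvG c (u - 1) < pvG c k)) = true := by
          rw [List.all_eq_true]
          intro k hk
          have hkR := PySem.List.mem_pyRange_one.mp hk
          rw [hnone k hkR.1 hkR.2]
          rfl
        simp only [pvPb, hall, Bool.and_true]
      rw [hL] at ihEq
      simp only [List.foldl_cons, List.foldl_nil, Option.map_none]
      cases hE : pvElig c (u - 1) with
      | true =>
        have hF : (List.filter (pvPb c lo) [u - 1]) = [u - 1] := by
          simp [hPb, hE]
        rw [pvInnerA_none, if_pos (by rw [hE]), hMnil, hF]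
        refine ⟨by simp, ?_, ?_⟩
        · intro m hm y hy1 hy2 hyE
          simp at hm
          subst hm
          rcases lt_or_eq_of_le (show y ≤ u - 1 by omega) with hy | hy
          · exact absurd hyE (by rw [hnone y hy1 hy]; simp)
          · rw [hy]
        · intro hcon; simp at hcon
      | false =>
        have hF : (List.filter (pvPb c lo) [u - 1]) = [] := by
          simp [hPb, hE]
        rw [pvInnerA_none, if_neg (by rw [hE]; simp), hMnil, hF]
        refine ⟨rfl, ?_, ?_⟩
        · intro m hm; simp at hm
        · intro _ y hy1 hy2
          rcases lt_or_eq_of_le (show y ≤ u - 1 by omega) with hy | hy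
          · exact hnone y hy1 hy
          · rw [hy, hE]
    | some m =>
      have hmem : m ∈ (PySem.List.pyRange lo (u - 1) 1).filter (pvPb c lo) :=
        List.mem_of_getLast? hL
      obtain ⟨hmR', hmP⟩ := List.mem_filter.mp hmem
      have hmR := PySem.List.mem_pyRange_one.mp hmR'
      have hmE : pvElig c m = true := by
        simp only [pvPb, Bool.and_eq_true] at hmP
        exact hmP.1
      have hMin := ihMin m hL
      have hPb : pvPb c lo (u - 1) =
          (pvElig c (u - 1) && decide (pvG c (u - 1) < pvG c m)) := by
        rw [Bool.eq_iff_iff]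
        simp only [pvPb, Bool.and_eq_true, List.all_eq_true, decide_eq_true_eq]
        constructor
        · rintro ⟨h1, h2⟩
          refine ⟨h1, ?_⟩
          have := h2 m (PySem.List.mem_pyRange_one.mpr ⟨hmR.1, hmR.2⟩)
          simp only [hmE, Bool.not_true, Bool.false_or, decide_eq_true_eq] at this
          exact this
        · rintro ⟨h1, h2⟩
          refine ⟨h1, ?_⟩
          intro kk hkk
          have hkkR := PySem.List.mem_pyRange_one.mp hkk
          cases hkE : pvElig c kk with
          | false => simp
          | true =>
            have := hMin kk hkkR.1 (by omega) hkE
            simp only [Bool.not_true, Bool.false_or, decide_eq_true_eq]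
            omega
      rw [hL] at ihEq
      simp only [List.foldl_cons, List.foldl_nil, Option.map_some]
      rw [pvInnerA_some]
      cases hC : (pvElig c (u - 1) && decide (pvG c (u - 1) < pvG c m)) with
      | true =>
        have hF : (List.filter (pvPb c lo) [u - 1]) = [u - 1] := by
          simp [hPb, hC]
        rw [if_pos rfl, hF]
        refine ⟨by simp, ?_, ?_⟩
        · intro m' hm' y hy1 hy2 hyE
          rw [List.getLast?_concat] at hm'
          injection hm' with hm'
          subst hm'
          simp only [Bool.and_eq_true, decide_eq_true_eq] at hC
          rcases lt_or_eq_of_le (show y ≤ u - 1 by omega) with hy | hy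
          · have := hMin y hy1 hy hyE
            omega
          · rw [hy]
        · intro hcon; rw [List.getLast?_concat] at hcon; simp at hcon
      | false =>
        have hF : (List.filter (pvPb c lo) [u - 1]) = [] := by
          simp [hPb, hC]
        rw [if_neg (by simp), hF, List.append_nil]
        refine ⟨by rw [hL]; simp, ?_, ?_⟩
        · intro m' hm'
          rw [hL] at hm'
          injection hm' with hm'
          subst hm'
          intro y hy1 hy2 hyE
          rcases lt_or_eq_of_le (show y ≤ u - 1 by omega) with hy | hy
          · exact hMin y hy1 hy hyE
          · subst hy
            rcases Bool.and_eq_false_iff.mp hC with h1 | h1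
            · exact absurd hyE (by simp [h1])
            · simp only [decide_eq_false_iff_not, not_lt] at h1
              exact h1
        · intro hcon; rw [hL] at hcon; simp at hcon

-- ----- one deque step rewrites the skyline window -----
lemma pvDequeStep (c : List Int) (Bj n i : Int) (hn : i + 2 ≤ n) :
    pvPopRight (i + Bj)
      (if decide (-1 < pvG c (i + 1)) then
        (i + 1) :: pvPopLeft c (pvG c (i + 1))
          ((PySem.List.pyRange (i + 2) (min (i + Bj + 2) n) 1).filter (pvPb c (i + 2)))
      else (PySem.List.pyRange (i + 2) (min (i + Bj + 2) n) 1).filter (pvPb c (i + 2))) =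
    (PySem.List.pyRange (i + 1) (min (i + Bj + 1) n) 1).filter (pvPb c (i + 1)) := by
  have h12 : i + 1 + 1 = i + 2 := by ring
  have hdq1 : (if decide (-1 < pvG c (i + 1)) then
        (i + 1) :: pvPopLeft c (pvG c (i + 1))
          ((PySem.List.pyRange (i + 2) (min (i + Bj + 2) n) 1).filter (pvPb c (i + 2)))
      else (PySem.List.pyRange (i + 2) (min (i + Bj + 2) n) 1).filter (pvPb c (i + 2))) =
      ((i + 1) :: PySem.List.pyRange (i + 2) (min (i + Bj + 2) n) 1).filter
        (pvPb c (i + 1)) := by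
    by_cases hv : -1 < pvG c (i + 1)
    · rw [if_pos (by simp [hv])]
      have hpair := pvPb_filter_pairwise c (i + 2) (min (i + Bj + 2) n)
      rw [pvPopLeft_eq_dropWhile, pvDropWhile_eq_filter c _ _ hpair, List.filter_filter]
      have hhead : pvPb c (i + 1) (i + 1) = true := by
        rw [pvPb_self]; simp [pvElig, hv]
      rw [List.filter_cons, hhead, if_pos rfl]
      congr 1
      apply List.filter_congr
      intro y hy
      have hyR := PySem.List.mem_pyRange_one.mp hy
      rw [pvPb_cons c (i + 1) y (by omega), h12]
      have hE : pvElig c (i + 1) = true := by simp [pvElig, hv]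
      rw [hE]
      simp
    · rw [if_neg (by simp [hv])]
      have hhead : pvPb c (i + 1) (i + 1) = false := by
        rw [pvPb_self]; simp [pvElig, hv]
      rw [List.filter_cons, hhead]
      simp only [Bool.false_eq_true, if_false]
      apply List.filter_congr
      intro y hy
      have hyR := PySem.List.mem_pyRange_one.mp hy
      rw [pvPb_cons c (i + 1) y (by omega), h12]
      have hE : pvElig c (i + 1) = false := by simp [pvElig, hv]
      rw [hE]
      simp
  rw [hdq1]
  have hpair2 : (((i + 1) :: PySem.List.pyRange (i + 2) (min (i + Bj + 2) n) 1).filter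
      (pvPb c (i + 1))).Pairwise (· < ·) := by
    refine List.Pairwise.sublist List.filter_sublist ?_
    rw [List.pairwise_cons]
    exact ⟨fun y hy => by have := PySem.List.mem_pyRange_one.mp hy; omega,
      PySem.List.pairwise_lt_pyRange_one _ _⟩
  rw [pvPopRight_eq_filter _ _ hpair2, List.filter_filter]
  have hR : PySem.List.pyRange (i + 1) (min (i + Bj + 1) n) 1 =
      ((i + 1) :: PySem.List.pyRange (i + 2) (min (i + Bj + 2) n) 1).filter
        (fun y => decide (y ≤ i + Bj)) := by
    by_cases hB : 1 ≤ Bj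
    · have hcons : (i + 1) :: PySem.List.pyRange (i + 2) (min (i + Bj + 2) n) 1 =
          PySem.List.pyRange (i + 1) (min (i + Bj + 2) n) 1 := by
        have hc := PySem.List.pyRange_one_cons
          (a := i + 1) (b := min (i + Bj + 2) n) (by omega)
        rw [h12] at hc
        exact hc.symm
      rw [hcons, pvRange_filter_le]
      have hmm : min (i + Bj + 1) (min (i + Bj + 2) n) = min (i + Bj + 1) n := by omega
      rw [← hmm]
    · rw [PySem.List.pyRange_one_eq_nil (by omega : min (i + Bj + 2) n ≤ i + 2)]
      rw [PySem.List.pyRange_one_eq_nil (by omega : min (i + Bj + 1) n ≤ i + 1)]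
      simp [show ¬(i + 1 ≤ i + Bj) by omega]
  rw [hR, List.filter_filter]
  apply List.filter_congr
  intro y hy
  rw [Bool.and_comm]

-- ----- the invariant is preserved by one step of both loops -----
lemma pvInvStep (A0 : List Int) (Bj i : Int) (h0 : 0 ≤ i) (hi : i ≤ (A0.length : Int) - 2)
    (sA : List Int × PySem.Dict Int (List Int)) (sB : List Int × PySem.Dict Int Int × List Int)
    (hInv : pvInv A0 Bj i sA sB) :
    pvInv A0 Bj (i - 1) (pvStepA Bj A0.length sA i) (pvStepB Bj sB i) := by
  obtain ⟨a, pm⟩ := sA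
  obtain ⟨c, par, dq⟩ := sB
  obtain ⟨hac, hlen, hA0, hpar, helig, hkeys, hval, hdq⟩ := hInv
  simp only at hac hlen hA0 hpar helig hkeys hval hdq
  subst hac
  have hdq2 : pvPopRight (i + Bj)
      (if decide (-1 < PySem.List.pyGetD a (i + 1) 0) then
        (i + 1) :: pvPopLeft a (PySem.List.pyGetD a (i + 1) 0) dq else dq) =
      (PySem.List.pyRange (i + 1) (min (i + Bj + 1) (A0.length : Int)) 1).filter
        (pvPb a (i + 1)) := by
    rw [hdq]
    exact pvDequeStep a Bj (A0.length : Int) i (by omega)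
  obtain ⟨hscan, hscanMin, hscanNone⟩ :=
    pvScan a (i + 1) ((min (i + Bj + 1) (A0.length : Int)) - (i + 1)).toNat
      (min (i + Bj + 1) (A0.length : Int)) rfl
  simp only [pvStepA, pvStepB]
  rw [hdq2, hscan]
  simp only [beq_iff_eq]
  by_cases hskip : PySem.List.pyGetD a i 0 = -1
  · rw [if_pos hskip, if_pos hskip]
    unfold pvInv
    dsimp only
    refine ⟨rfl, hlen, ?_, ?_, ?_, ?_, hval, ?_⟩
    · intro j hj0 hj
      exact hA0 j hj0 (by omega)
    · intro j p h
      have old := hpar j p h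
      exact ⟨by omega, old.2.1, old.2.2.1, old.2.2.2⟩
    · intro j h1 h2 h3
      by_cases hji : j = i
      · rw [hji] at h3
        exact absurd h3 (by simp [pvG, hskip])
      · exact helig j (by omega) h2 h3
    · intro j
      by_cases hji : j = i
      · have hparI : (par.get? j).isSome = false := by
          cases hpi : par.get? j with
          | none => rfl
          | some p => exact absurd (hpar j p hpi).1 (by omega)
        have hpmI : (pm.get? j).isSome = false := by
          by_cases hb : (pm.get? j).isSome
          · exact absurd ((hkeys j).mp hb).1 (by omega)
          · simpa using hb
        simp [hpmI, hparI]
        try omega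
      · rw [hkeys j]
        constructor <;> rintro ⟨h1, h2, h3⟩ <;> exact ⟨by omega, h2, h3⟩
    · have e1 : i - 1 + 2 = i + 1 := by ring
      have e2 : i - 1 + Bj + 2 = i + Bj + 1 := by ring
      simp only [e1, e2]
      try rfl
  · rw [if_neg hskip, if_neg hskip]
    cases hL : ((PySem.List.pyRange (i + 1) (min (i + Bj + 1) (A0.length : Int)) 1).filter
        (pvPb a (i + 1))).getLast? with
    | none =>
      unfold pvInv
      dsimp only
      refine ⟨rfl, ?_, ?_, ?_, ?_, ?_, hval, ?_⟩
      · rw [PySem.List.length_pySetD]; exact hlen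
      · intro j hj0 hj
        have hji : j ≠ i := by omega
        rw [pvG_set_ne a i j (-1) h0 hj0 hji]
        exact hA0 j hj0 (by omega)
      · intro j p h
        have old := hpar j p h
        exact ⟨by omega, old.2.1, old.2.2.1, old.2.2.2⟩
      · intro j h1 h2 h3
        by_cases hji : j = i
        · rw [hji] at h3
          rw [pvG_set_self a i (-1) h0 (by omega)] at h3
          exact absurd h3 (by omega)
        · rw [pvG_set_ne a i j (-1) h0 (by omega) hji] at h3
          exact helig j (by omega) h2 h3
      · intro j
        by_cases hji : j = i
        · have hparI : (par.get? j).isSome = false := by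
            cases hpi : par.get? j with
            | none => rfl
            | some p => exact absurd (hpar j p hpi).1 (by omega)
          have hpmI : (pm.get? j).isSome = false := by
            by_cases hb : (pm.get? j).isSome
            · exact absurd ((hkeys j).mp hb).1 (by omega)
            · simpa using hb
          simp [hpmI, hparI]
          try omega
        · rw [hkeys j]
          constructor <;> rintro ⟨h1, h2, h3⟩ <;> exact ⟨by omega, h2, h3⟩
      · have e1 : i - 1 + 2 = i + 1 := by ring
        have e2 : i - 1 + Bj + 2 = i + Bj + 1 := by ring
        simp only [e1, e2]
        refine (List.filter_congr ?_)
        intro y hy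
        have hyR := PySem.List.mem_pyRange_one.mp hy
        exact (pvPb_set a i (-1) (i + 1) y h0 (by omega) (by omega)).symm
    | some m =>
      have hmem : m ∈ (PySem.List.pyRange (i + 1)
          (min (i + Bj + 1) (A0.length : Int)) 1).filter (pvPb a (i + 1)) :=
        List.mem_of_getLast? hL
      obtain ⟨hmR', hmP⟩ := List.mem_filter.mp hmem
      have hmR := PySem.List.mem_pyRange_one.mp hmR'
      have hmElig : -1 < pvG a m := by
        simp only [pvPb, Bool.and_eq_true, pvElig, decide_eq_true_eq] at hmP
        exact hmP.1
      have hmn1 : m ≤ (A0.length : Int) - 1 := by omega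
      have hmKey : (pm.get? m).isSome := by
        refine (hkeys m).mpr ⟨by omega, hmn1, ?_⟩
        by_cases hm1 : m = (A0.length : Int) - 1
        · exact Or.inl hm1
        · exact Or.inr (helig m (by omega) (by omega) hmElig)
      obtain ⟨lm, hlm⟩ := Option.isSome_iff_exists.mp hmKey
      have hlmVal := hval m lm hlm
      have hgetD : pm.getD m [] = lm := by
        rw [PySem.Dict.getD_eq_get?_getD, hlm]; rfl
      have hmono : ∀ k p, par.get? k = some p → k < p := fun k p h => (hpar k p h).2.1
      unfold pvInv
      dsimp only
      refine ⟨rfl, ?_, ?_, ?_, ?_, ?_, ?_, ?_⟩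
      · rw [PySem.List.length_pySetD]; exact hlen
      · intro j hj0 hj
        have hji : j ≠ i := by omega
        rw [pvG_set_ne a i j _ h0 hj0 hji]
        exact hA0 j hj0 (by omega)
      · intro j p hjp
        rw [PySem.Dict.get?_insert] at hjp
        by_cases hji : j = i
        · rw [if_pos hji] at hjp
          injection hjp with hjp
          subst hjp
          refine ⟨by omega, by omega, by omega, ?_⟩
          by_cases hm1 : m = (A0.length : Int) - 1
          · exact Or.inl (by omega)
          · refine Or.inr ?_
            rw [PySem.Dict.get?_insert, if_neg (by omega : m ≠ i)]
            exact helig m (by omega) (by omega) hmElig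
        · rw [if_neg hji] at hjp
          have old := hpar j p hjp
          refine ⟨by omega, old.2.1, old.2.2.1, ?_⟩
          rcases old.2.2.2 with h | h
          · exact Or.inl h
          · refine Or.inr ?_
            rw [PySem.Dict.get?_insert, if_neg (by omega : p ≠ i)]
            exact h
      · intro j h1 h2 h3
        by_cases hji : j = i
        · rw [hji, PySem.Dict.get?_insert, if_pos rfl]
          rfl
        · rw [pvG_set_ne a i j _ h0 (by omega) hji] at h3
          rw [PySem.Dict.get?_insert, if_neg hji]
          exact helig j (by omega) h2 h3
      · intro j
        by_cases hji : j = i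
        · rw [hji]
          simp
          omega
        · rw [PySem.Dict.get?_insert, if_neg hji]
          rw [hkeys j]
          rw [PySem.Dict.get?_insert, if_neg hji]
          constructor <;> rintro ⟨h1, h2, h3⟩ <;> exact ⟨by omega, h2, h3⟩
      · intro j l hjl
        rw [PySem.Dict.get?_insert] at hjl
        by_cases hji : j = i
        · rw [if_pos hji] at hjl
          injection hjl with hjl
          subst hjl
          rw [hgetD, hji]
          obtain ⟨f, hf⟩ : ∃ f, A0.length = f + 1 := ⟨A0.length - 1, by omega⟩
          rw [hf]
          simp only [pvRebuild, PySem.Dict.get?_insert_self]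
          have hstab : pvRebuild (par.insert i m) f m = pvRebuild par f m :=
            pvRebuild_insert par i m hmono f m (by omega)
          have hfuel : pvRebuild par f m = pvRebuild par (f + 1) m :=
            pvRebuild_fuel par (A0.length : Int)
              (fun k p h => ⟨(hpar k p h).2.1, (hpar k p h).2.2.1⟩) f (f + 1) m
              (by omega) (by omega)
          rw [hf] at hlmVal
          rw [List.reverse_cons, hstab, hfuel, ← hlmVal]
        · rw [if_neg hji] at hjl
          have old := hval j l hjl
          have hij : i < j := ((hkeys j).mp (by rw [hjl]; rfl)).1
          rw [pvRebuild_insert par i m hmono A0.length j hij]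
          exact old
      · have e1 : i - 1 + 2 = i + 1 := by ring
        have e2 : i - 1 + Bj + 2 = i + Bj + 1 := by ring
        simp only [e1, e2]
        refine (List.filter_congr ?_)
        intro y hy
        have hyR := PySem.List.mem_pyRange_one.mp hy
        exact (pvPb_set a i _ (i + 1) y h0 (by omega) (by omega)).symm

-- ----- partial-run recurrences and the main induction -----
lemma pvRange_neg_step (a b : Int) (h : b ≤ a) :
    PySem.List.pyRange a (b - 1) (-1) = PySem.List.pyRange a b (-1) ++ [b] := by
  rw [PySem.List.pyRange_neg_one_eq_reverse, PySem.List.pyRange_neg_one_eq_reverse]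
  have hb : b - 1 + 1 = b := by ring
  rw [hb, PySem.List.pyRange_one_cons (by omega : b < a + 1), List.reverse_cons]

lemma pvRunA_rec (A0 : List Int) (Bj i : Int) (_h0 : 0 ≤ i) (hi : i ≤ (A0.length : Int) - 2) :
    pvRunA A0 Bj (i - 1) = pvStepA Bj A0.length (pvRunA A0 Bj i) i := by
  unfold pvRunA
  rw [pvRange_neg_step _ i (by omega), List.foldl_append]
  rfl

lemma pvRunB_rec (A0 : List Int) (Bj i : Int) (_h0 : 0 ≤ i) (hi : i ≤ (A0.length : Int) - 2) :
    pvRunB A0 Bj (i - 1) = pvStepB Bj (pvRunB A0 Bj i) i := by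
  unfold pvRunB
  rw [pvRange_neg_step _ i (by omega), List.foldl_append]
  rfl

lemma pvInvBase (A0 : List Int) (Bj : Int) (hn : 1 ≤ (A0.length : Int)) :
    pvInv A0 Bj ((A0.length : Int) - 2) (pvRunA A0 Bj ((A0.length : Int) - 2))
      (pvRunB A0 Bj ((A0.length : Int) - 2)) := by
  unfold pvRunA pvRunB pvInv
  rw [PySem.List.pyRange_neg_one_eq_nil (le_refl _)]
  simp only [List.foldl_nil]
  refine ⟨by trivial, by trivial, by intro j _ _; trivial, ?_, ?_, ?_, ?_, ?_⟩
  · intro j p h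
    simp [PySem.Dict.get?_empty] at h
  · intro j h1 h2 h3
    exfalso; omega
  · intro j
    rw [PySem.Dict.get?_insert]
    by_cases hj : j = (A0.length : Int) - 1
    · simp [hj]
      try omega
    · simp [hj, PySem.Dict.get?_empty]
      try omega
  · intro j l h
    rw [PySem.Dict.get?_insert] at h
    by_cases hj : j = (A0.length : Int) - 1
    · rw [if_pos hj] at h
      injection h with h
      subst h
      subst hj
      obtain ⟨f, hA⟩ : ∃ f, A0.length = f + 1 := ⟨A0.length - 1, by omega⟩
      rw [hA]
      simp only [pvRebuild, PySem.Dict.get?_empty]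
      simp
      try omega
    · rw [if_neg hj] at h
      simp [PySem.Dict.get?_empty] at h
  · rw [PySem.List.pyRange_one_eq_nil (by omega)]
    rfl

lemma pvInvMain (A0 : List Int) (Bj : Int) (hn : 1 ≤ (A0.length : Int)) :
    ∀ k : Nat, k ≤ ((A0.length : Int) - 1).toNat →
      pvInv A0 Bj ((A0.length : Int) - 2 - k) (pvRunA A0 Bj ((A0.length : Int) - 2 - k))
        (pvRunB A0 Bj ((A0.length : Int) - 2 - k)) := by
  intro k
  induction k with
  | zero =>
    intro _
    simpa using pvInvBase A0 Bj hn
  | succ k ih =>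
    intro hk
    have hcast : ((k + 1 : Nat) : Int) = (k : Int) + 1 := by push_cast; ring
    have h0 : 0 ≤ (A0.length : Int) - 2 - k := by omega
    have hile : (A0.length : Int) - 2 - k ≤ (A0.length : Int) - 2 := by omega
    have heq : (A0.length : Int) - 2 - ((k + 1 : Nat) : Int) =
        ((A0.length : Int) - 2 - k) - 1 := by omega
    rw [heq, pvRunA_rec A0 Bj _ h0 hile, pvRunB_rec A0 Bj _ h0 hile]
    exact pvInvStep A0 Bj _ h0 hile _ _ (ih (by omega))

-- ===== VERDICT (by name: the statement is the Claim_ definition above) =====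
lemma pvPortA (A : List Int) (B : Int) :
    cheapestJump A B = (match (pvRunA A B (-1)).2.get? 0 with
      | some l => if l.reverse.isEmpty then [] else l.reverse
      | none => []) := by
  unfold cheapestJump pvRunA
  rw [PySem.List.len_eq]

lemma pvPortB (A : List Int) (B : Int) (hn : A.length ≠ 0) :
    cheapestJump_alt A B =
      (if ((A.length : Int) == 1 || ((pvRunB A B (-1)).2.1.get? 0).isSome) then
        pvRebuild (pvRunB A B (-1)).2.1 A.length 0
      else []) := by
  unfold cheapestJump_alt pvRunB
  rw [PySem.List.len_eq]
  rw [if_neg (by simp only [beq_iff_eq]; omega)]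

theorem cheapestJump_spec : Claim_equal_cheapestJump := by
  intro A B _
  show cheapestJump A B = cheapestJump_alt A B
  by_cases hn : A.length = 0
  · have hA : A = [] := List.length_eq_zero_iff.mp hn
    subst hA
    rfl
  · have hn1 : 1 ≤ (A.length : Int) := by omega
    have hmain := pvInvMain A B hn1 ((A.length : Int) - 1).toNat (le_refl _)
    have hidx : (A.length : Int) - 2 - (((A.length : Int) - 1).toNat : Int) = -1 := by omega
    rw [hidx] at hmain
    obtain ⟨hac, hlen, hA0, hpar, helig, hkeys, hval, hdq⟩ := hmain
    rw [pvPortA, pvPortB A B hn]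
    cases h0 : (pvRunA A B (-1)).2.get? 0 with
    | some l =>
      dsimp only
      have hv := hval 0 l h0
      have hcond : ((A.length : Int) == 1 || ((pvRunB A B (-1)).2.1.get? 0).isSome) = true := by
        have hk := (hkeys 0).mp (by rw [h0]; rfl)
        rcases hk.2.2 with h | h
        · have h1 : (A.length : Int) = 1 := by omega
          simp [h1]
        · simp [h]
      have hrev : l.reverse = pvRebuild (pvRunB A B (-1)).2.1 A.length 0 := by
        rw [hv, List.reverse_reverse]
      have hne : l.reverse ≠ [] := by
        rw [hrev]; exact pvRebuild_ne_nil _ _ _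
      have hEmpty : l.reverse.isEmpty = false := by
        cases hrevl : l.reverse with
        | nil => exact absurd hrevl hne
        | cons x xs => rfl
      rw [if_neg (by rw [hEmpty]; simp)]
      rw [if_pos (by rw [hcond])]
      exact hrev
    | none =>
      dsimp only
      have hcond : ((A.length : Int) == 1 || ((pvRunB A B (-1)).2.1.get? 0).isSome) = false := by
        rw [Bool.or_eq_false_iff]
        constructor
        · by_cases h1 : (A.length : Int) = 1
          · exfalso
            have := (hkeys 0).mpr ⟨by omega, by omega, Or.inl (by omega)⟩
            rw [h0] at this
            simp at this
          · simp [h1]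
        · by_cases hp : ((pvRunB A B (-1)).2.1.get? 0).isSome
          · exfalso
            have := (hkeys 0).mpr ⟨by omega, by omega, Or.inr hp⟩
            rw [h0] at this
            simp at this
          · simpa using hp
      rw [if_neg (by rw [hcond]; simp)]
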